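-- pv_equiv track=rewrite | github.com/kwanwchan9/python-sentiment-classication | Naive Bayes classiﬁer.py | tweet_words_extract
-- ===== SOURCE A (Python) =====
-- import string
--
-- def tweet_words_extract(tweets):
--     words = []
--     lower_alpha = string.ascii_lowercase
--     upper_alpha = string.ascii_uppercase
--     numbers = [str(n) for n in range(10)]
--     for word in tweets:
--         cur_word = ''
--         for c in word:
--             if (c not in lower_alpha) and (c not in upper_alpha) and (c not in numbers):
--                 if len(cur_word) >= 2:
--                     words.append(cur_word.lower())
--                 cur_word = ''
--                 continue
--             cur_word += c
--         if len(cur_word) >= 2: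
--             words.append(cur_word.lower())
--     return words
-- ===== SOURCE B (Python) =====
-- def tweet_words_extract(tweets):
--     return [token.lower()
--             for word in tweets
--             for token in ''.join(c if c.isalnum() else ' ' for c in word).split()
--             if len(token) >= 2]
-- ===== Notes on version B (the rewrite author's own statement) =====
-- stated objective: idiomatic
-- what changed: Replaced the hand-written per-character accumulate/flush state machine over three alphabet tables with a mask-and-split comprehension: non-alphanumeric characters are mapped to spaces and str.split() extracts the maximal alphanumeric runs, which are then filtered by length and lowercased.
import Mathlib
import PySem

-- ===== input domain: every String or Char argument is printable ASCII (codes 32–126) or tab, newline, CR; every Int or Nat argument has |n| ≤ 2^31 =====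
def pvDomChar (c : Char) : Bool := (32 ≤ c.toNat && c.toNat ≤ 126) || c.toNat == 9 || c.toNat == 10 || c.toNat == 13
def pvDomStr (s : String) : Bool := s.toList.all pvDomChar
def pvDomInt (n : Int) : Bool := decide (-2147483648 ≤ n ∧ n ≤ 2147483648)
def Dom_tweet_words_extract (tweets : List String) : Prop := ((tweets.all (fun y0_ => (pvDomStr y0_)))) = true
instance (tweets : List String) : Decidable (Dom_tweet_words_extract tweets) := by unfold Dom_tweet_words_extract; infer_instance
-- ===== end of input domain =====

set_option maxRecDepth 2048

-- B replaces A's per-character accumulate/flush state machine with mask-to-space + split() run extraction (idiomatic; same cost).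

-- ===== PORT A =====
def pvLowerAlpha : List Char := "abcdefghijklmnopqrstuvwxyz".toList
def pvUpperAlpha : List Char := "ABCDEFGHIJKLMNOPQRSTUVWXYZ".toList
def pvNumbers : List String := (PySem.List.pyRange 0 10 1).map (fun n => PySem.Int.toStr n)

-- the `(c not in lower_alpha) and (c not in upper_alpha) and (c not in numbers)` test of A
def pvNonAlnumTest (c : Char) : Bool :=
  !(pvLowerAlpha.contains c) && !(pvUpperAlpha.contains c) && !(pvNumbers.contains (String.ofList [c]))

-- one step of A's inner `for c in word` loop; state = (words, cur_word)
def pvStepA (s : List String × List Char) (c : Char) : List String × List Char :=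
  if pvNonAlnumTest c then
    (if 2 ≤ s.2.length then s.1 ++ [String.ofList (PySem.Chars.lower s.2)] else s.1, [])
  else
    (s.1, s.2 ++ [c])

-- body of A's outer loop: inner loop, then the final flush of cur_word
def pvWordA (words : List String) (word : String) : List String :=
  let st := word.toList.foldl pvStepA (words, [])
  if 2 ≤ st.2.length then st.1 ++ [String.ofList (PySem.Chars.lower st.2)] else st.1

def tweet_words_extract (tweets : List String) : List String :=
  tweets.foldl pvWordA []

-- ===== PORT B =====
-- `c if c.isalnum() else ' '`
def pvMask (c : Char) : Char := if PySem.Chars.isalnum c then c else ' '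

-- `[token.lower() for token in ''.join(...).split() if len(token) >= 2]` for one word
def pvWordB (word : String) : List String :=
  ((PySem.Chars.split₀ (word.toList.map pvMask)).filter
      (fun token => 2 ≤ token.length)).map
    (fun token => String.ofList (PySem.Chars.lower token))

def tweet_words_extract_alt (tweets : List String) : List String :=
  tweets.flatMap pvWordB

-- ===== PRECONDITION & SPEC =====
def Spec_tweet_words_extract (tweets : List String) (out : List String) : Prop := out = tweet_words_extract_alt tweets
instance (tweets : List String) (out : List String) : Decidable (Spec_tweet_words_extract tweets out) := by unfold Spec_tweet_words_extract; infer_instance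

-- ===== CLAIM (what is proved, stated in full; the proofs are below) =====
def Claim_equal_tweet_words_extract : Prop := ∀ (tweets : List String), Dom_tweet_words_extract tweets → Spec_tweet_words_extract tweets (tweet_words_extract tweets)

-- ===== LEMMAS AND PROOFS =====

-- On the ASCII domain, A's triple not-in test is exactly "not alphanumeric".
lemma pvTest_eq (c : Char) (h : pvDomChar c = true) :
    pvNonAlnumTest c = !PySem.Chars.isalnum c := by
  have h126 : c.toNat < 127 := by
    simp [pvDomChar] at h; omega
  have hall : ∀ m : Fin 127, pvNonAlnumTest (Char.ofNat m.val) = !PySem.Chars.isalnum (Char.ofNat m.val) := by decide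
  have hc : Char.ofNat c.toNat = c := Char.ofNat_toNat c
  have := hall ⟨c.toNat, h126⟩
  simpa [hc] using this

-- Masking sends alphanumerics to themselves (non-space) and everything else to a space.
lemma pvMask_isspace (c : Char) (h : pvDomChar c = true) :
    PySem.Chars.isspace (pvMask c) = !PySem.Chars.isalnum c := by
  have h126 : c.toNat < 127 := by
    simp [pvDomChar] at h; omega
  have hall : ∀ m : Fin 127, PySem.Chars.isspace (pvMask (Char.ofNat m.val)) = !PySem.Chars.isalnum (Char.ofNat m.val) := by decide
  have hc : Char.ofNat c.toNat = c := Char.ofNat_toNat c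
  have := hall ⟨c.toNat, h126⟩
  simpa [hc] using this

-- split₀.go emits the tokens already in acc (reversed) up front.
lemma pvGo_acc (cs : List Char) : ∀ cur acc,
    PySem.Chars.split₀.go cs cur acc = acc.reverse ++ PySem.Chars.split₀.go cs cur [] := by
  induction cs with
  | nil =>
      intro cur acc
      by_cases h : cur.isEmpty <;> simp [PySem.Chars.split₀.go, h]
  | cons c rest ih =>
      intro cur acc
      by_cases hs : PySem.Chars.isspace c
      · by_cases h : cur.isEmpty
        · rw [show PySem.Chars.split₀.go (c :: rest) cur acc = PySem.Chars.split₀.go rest [] acc from by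
                simp [PySem.Chars.split₀.go, hs, h],
              show PySem.Chars.split₀.go (c :: rest) cur [] = PySem.Chars.split₀.go rest [] [] from by
                simp [PySem.Chars.split₀.go, hs, h],
              ih [] acc]
        · rw [show PySem.Chars.split₀.go (c :: rest) cur acc
                  = PySem.Chars.split₀.go rest [] (cur.reverse :: acc) from by
                simp [PySem.Chars.split₀.go, hs, h],
              show PySem.Chars.split₀.go (c :: rest) cur [] = PySem.Chars.split₀.go rest [] [cur.reverse] from by
                simp [PySem.Chars.split₀.go, hs, h],
              ih [] (cur.reverse :: acc), ih [] [cur.reverse]]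
          simp
      · rw [show PySem.Chars.split₀.go (c :: rest) cur acc = PySem.Chars.split₀.go rest (c :: cur) acc from by
              simp [PySem.Chars.split₀.go, hs],
            show PySem.Chars.split₀.go (c :: rest) cur [] = PySem.Chars.split₀.go rest (c :: cur) [] from by
              simp [PySem.Chars.split₀.go, hs],
            ih (c :: cur) acc]

-- Core per-word invariant: A's inner loop + final flush equals B's filter/map over the runs of the masked word.
lemma pvInner (cs : List Char) : ∀ (cur : List Char) (words : List String),
    (∀ c ∈ cs, pvDomChar c = true) →
    (if 2 ≤ (cs.foldl pvStepA (words, cur)).2.length then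
        (cs.foldl pvStepA (words, cur)).1 ++ [String.ofList (PySem.Chars.lower (cs.foldl pvStepA (words, cur)).2)]
      else (cs.foldl pvStepA (words, cur)).1)
      = words ++ ((PySem.Chars.split₀.go (cs.map pvMask) cur.reverse []).filter
            (fun token => 2 ≤ token.length)).map
          (fun token => String.ofList (PySem.Chars.lower token)) := by
  induction cs with
  | nil =>
      intro cur words _
      rcases eq_or_ne cur [] with rfl | hne
      · simp [PySem.Chars.split₀.go]
      · have : cur.reverse.isEmpty = false := by simp [hne]
        by_cases hlen : 2 ≤ cur.length <;>
          simp [PySem.Chars.split₀.go, this, hlen]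
  | cons c rest ih =>
      intro cur words hdom
      have hc : pvDomChar c = true := hdom c (by simp)
      have hrest : ∀ c' ∈ rest, pvDomChar c' = true := fun c' h' => hdom c' (by simp [h'])
      by_cases ha : PySem.Chars.isalnum c
      · -- alphanumeric: both sides extend the current run
        have ht : pvNonAlnumTest c = false := by simp [pvTest_eq c hc, ha]
        have hm : pvMask c = c := by simp [pvMask, ha]
        have hsp : PySem.Chars.isspace c = false := by
          have := pvMask_isspace c hc; rw [hm] at this; simp [this, ha]
        simp only [List.foldl_cons, List.map_cons, pvStepA, ht, Bool.false_eq_true, if_false,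
          hm, PySem.Chars.split₀.go, hsp]
        rw [ih (cur ++ [c]) words hrest]
        simp
      · -- separator: both sides flush the current run
        have ht : pvNonAlnumTest c = true := by simp [pvTest_eq c hc, ha]
        have hm : pvMask c = ' ' := by simp [pvMask, ha]
        have hsp : PySem.Chars.isspace (pvMask c) = true := by simp [pvMask_isspace c hc, ha]
        rw [hm] at hsp
        rcases eq_or_ne cur [] with rfl | hne
        · simp only [List.foldl_cons, List.map_cons, pvStepA, ht, hm,
            PySem.Chars.split₀.go, hsp, List.reverse_nil, List.isEmpty_nil, if_pos]
          have := ih [] words hrest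
          simpa using this
        · have hemp : cur.reverse.isEmpty = false := by simp [hne]
          simp only [List.foldl_cons, List.map_cons, pvStepA, ht, if_true, hm,
            PySem.Chars.split₀.go, hsp, hemp, Bool.false_eq_true, if_false]
          rw [pvGo_acc (rest.map pvMask) [] [cur.reverse.reverse]]
          by_cases hlen : 2 ≤ cur.length
          · rw [if_pos hlen, ih [] (words ++ [String.ofList (PySem.Chars.lower cur)]) hrest]
            simp [hlen]
          · rw [if_neg hlen, ih [] words hrest]
            simp [hlen]

-- Per-word agreement.
lemma pvWord_eq (words : List String) (word : String) (h : pvDomStr word = true) :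
    pvWordA words word = words ++ pvWordB word := by
  have hdom : ∀ c ∈ word.toList, pvDomChar c = true := by
    simpa [pvDomStr, List.all_eq_true] using h
  have := pvInner word.toList [] words hdom
  simpa [pvWordA, pvWordB, PySem.Chars.split₀] using this

-- Outer loop: A's foldl with an accumulator is B's flatMap.
lemma pvOuter (tweets : List String) : ∀ acc,
    (tweets.all (fun w => pvDomStr w)) = true →
    tweets.foldl pvWordA acc = acc ++ tweets.flatMap pvWordB := by
  induction tweets with
  | nil => intro acc _; simp
  | cons w rest ih =>
      intro acc h
      simp only [List.all_cons, Bool.and_eq_true] at h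
      simp only [List.foldl_cons, List.flatMap_cons]
      rw [pvWord_eq acc w h.1, ih (acc ++ pvWordB w) h.2]
      simp

-- ===== VERDICT (by name: the statement is the Claim_ definition above) =====
theorem tweet_words_extract_spec : Claim_equal_tweet_words_extract := by
  intro tweets hdom
  unfold Spec_tweet_words_extract tweet_words_extract tweet_words_extract_alt
  exact pvOuter tweets [] hdom
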